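-- pv_equiv track=rewrite | github.com/haesol1013/codetree-TILs | 241116/빙산의 일각/the-tip-of-the-iceberg.py | count_bingsan
-- ===== SOURCE A (Python) =====
-- def count_bingsan(arr, h):
--     over = False
--     cnt = 0
--     for bingsan in arr:
--         if bingsan > h:
--             over = True
--         else:
--             if over:
--                 cnt += 1
--                 over = False
--     if over:
--         cnt += 1
--     return cnt
-- ===== SOURCE B (Python) =====
-- def count_bingsan(arr, h):
--     # Rising-edge count: a run above h starts exactly where cur > h >= prev,
--     # with a sentinel prev = h before the first element.
--     return sum(cur > h >= prev for prev, cur in zip([h] + arr, arr))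
-- ===== Notes on version B (the rewrite author's own statement) =====
-- stated objective: idiomatic
-- what changed: Replaces the carried 'over' flag plus end-of-loop fixup with rising-edge detection: zip the list with itself shifted by one (sentinel h) and sum the positions where cur > h >= prev.
import Mathlib
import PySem

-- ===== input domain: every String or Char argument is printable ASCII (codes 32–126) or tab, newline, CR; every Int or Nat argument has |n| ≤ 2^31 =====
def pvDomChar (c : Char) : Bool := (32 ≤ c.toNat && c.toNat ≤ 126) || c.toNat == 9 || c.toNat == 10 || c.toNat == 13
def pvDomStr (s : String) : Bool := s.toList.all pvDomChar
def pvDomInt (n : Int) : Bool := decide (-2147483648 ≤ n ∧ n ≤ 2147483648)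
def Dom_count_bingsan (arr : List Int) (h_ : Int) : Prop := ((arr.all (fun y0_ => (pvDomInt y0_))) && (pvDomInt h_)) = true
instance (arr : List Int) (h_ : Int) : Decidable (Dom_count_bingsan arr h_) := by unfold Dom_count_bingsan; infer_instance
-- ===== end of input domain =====

-- B replaces A's carried 'over' flag and end-of-loop fixup with rising-edge counting over the
-- list zipped with its shift-by-one (sentinel h); same O(n) cost, more idiomatic decomposition.


-- ===== PORT A =====
-- loop body: per element update of (over, cnt), branches in A's order
def count_bingsan_step (h_ : Int) (s : Bool × Int) (bingsan : Int) : Bool × Int :=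
  if bingsan > h_ then (true, s.2)
  else if s.1 then (false, s.2 + 1) else (s.1, s.2)

def count_bingsan (arr : List Int) (h_ : Int) : Int :=
  let s := arr.foldl (count_bingsan_step h_) (false, 0)
  if s.1 then s.2 + 1 else s.2

-- ===== PORT B =====
def count_bingsan_alt (arr : List Int) (h_ : Int) : Int :=
  Int.ofNat (((h_ :: arr).zip arr).countP (fun p => decide (p.2 > h_) && decide (h_ ≥ p.1)))

-- ===== PRECONDITION & SPEC =====
def Spec_count_bingsan (arr : List Int) (h_ : Int) (out : Int) : Prop := out = count_bingsan_alt arr h_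
instance (arr : List Int) (h_ : Int) (out : Int) : Decidable (Spec_count_bingsan arr h_ out) := by unfold Spec_count_bingsan; infer_instance

-- ===== CLAIM (what is proved, stated in full; the proofs are below) =====
def Claim_equal_count_bingsan : Prop := ∀ (arr : List Int) (h_ : Int), Dom_count_bingsan arr h_ → Spec_count_bingsan arr h_ (count_bingsan arr h_)

-- ===== LEMMAS AND PROOFS =====

theorem count_bingsan_key (h_ : Int) (xs : List Int) (p : Int) (cnt : Int) :
    (let s := xs.foldl (count_bingsan_step h_) (decide (p > h_), cnt)
     if s.1 then s.2 + 1 else s.2)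
    = cnt + (if p > h_ then 1 else 0)
        + Int.ofNat (((p :: xs).zip xs).countP (fun q => decide (q.2 > h_) && decide (h_ ≥ q.1))) := by
  induction xs generalizing p cnt with
  | nil =>
    simp only [List.foldl, List.zip_nil_right, List.countP_nil]
    by_cases hp : p > h_ <;> simp [hp]
  | cons x xs ih =>
    have hstep : count_bingsan_step h_ (decide (p > h_), cnt) x
        = (decide (x > h_), cnt + (if ¬ x > h_ ∧ p > h_ then 1 else 0)) := by
      unfold count_bingsan_step
      by_cases hx : x > h_ <;> by_cases hp : p > h_ <;> simp [hx, hp]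
    simp only [List.foldl, hstep, List.zip_cons_cons, List.countP_cons]
    rw [ih x]
    by_cases hx : x > h_ <;> by_cases hp : p > h_ <;>
      simp [hx, hp, le_of_not_gt] <;> omega

-- ===== VERDICT (by name: the statement is the Claim_ definition above) =====
theorem count_bingsan_spec : Claim_equal_count_bingsan := by
  intro arr h_ _
  unfold Spec_count_bingsan count_bingsan count_bingsan_alt
  have := count_bingsan_key h_ arr h_ 0
  simp only [show (decide (h_ > h_)) = false from by simp] at this
  simpa using this
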